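-- pv_equiv track=rewrite | github.com/scober/cs6120-lessons | project/test_pa_qe.py | vars_on_both_sides
-- ===== SOURCE A (Python) =====
-- def vars_on_both_sides(n):
--     return any(
--         (
--             3 * i >= 3 * (0 + 0)
--             and 3 * i < 3 * (0 + 2 * n)
--             and (
--                 3 * i >= 1 * (0 + 0)
--                 and 3 * i < 1 * (0 + 6 * n + 0)
--                 and (
--                     3 * i >= 1 * (0 + 0)
--                     and 3 * i < 1 * (0 + 6 * n + 0)
--                     and (
--                         3 * i >= 1 * (0 + 0)
--                         and 3 * i < 1 * (0 + 6 * n + 0)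
--                         and (3 * i < 1 * (0 + 12) and 3 * i > 1 * (0 + 2 * n + 0))
--                     )
--                 )
--             )
--             for i in range(n + n)
--         )
--     )
-- ===== SOURCE B (Python) =====
-- def vars_on_both_sides(n):
--     # The generator predicate reduces to: exists integer i with
--     # 0 <= i < 2*n, 3*i < 12 (i.e. i <= 3) and 3*i > 2*n.
--     # Such an i exists iff the largest candidate, min(2*n - 1, 3), works.
--     if n < 1:
--         return False
--     largest = min(2 * n - 1, 3)
--     return 3 * largest > 2 * n
-- ===== Notes on version B (the rewrite author's own statement) =====
-- stated objective: faster
-- what changed: Replaced the O(n) scan over range(2n) with an O(1) existence check: the inequalities hold for some i iff they hold for the largest candidate min(2n-1, 3).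
import Mathlib
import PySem

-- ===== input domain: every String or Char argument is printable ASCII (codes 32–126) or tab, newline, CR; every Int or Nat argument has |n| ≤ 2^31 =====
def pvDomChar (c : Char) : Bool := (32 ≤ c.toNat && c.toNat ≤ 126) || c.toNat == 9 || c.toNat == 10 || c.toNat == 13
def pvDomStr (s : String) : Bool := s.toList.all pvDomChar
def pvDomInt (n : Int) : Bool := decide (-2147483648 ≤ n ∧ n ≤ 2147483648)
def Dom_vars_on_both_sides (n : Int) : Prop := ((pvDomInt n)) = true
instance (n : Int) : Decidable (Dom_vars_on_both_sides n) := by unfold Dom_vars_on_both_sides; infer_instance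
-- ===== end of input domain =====

-- B replaces A's O(n) scan over range(2n) with an O(1) closed-form existence check.


-- ===== PORT A =====
-- A: any over range(n+n) of the nested inequality chain, transliterated literally.
def vars_on_both_sides (n : Int) : Bool :=
  (PySem.List.pyRange 0 (n + n) 1).any (fun i =>
    decide (3 * i ≥ 3 * (0 + 0)) &&
    (decide (3 * i < 3 * (0 + 2 * n)) &&
    (decide (3 * i ≥ 1 * (0 + 0)) &&
    (decide (3 * i < 1 * (0 + 6 * n + 0)) &&
    (decide (3 * i ≥ 1 * (0 + 0)) &&
    (decide (3 * i < 1 * (0 + 6 * n + 0)) &&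
    (decide (3 * i ≥ 1 * (0 + 0)) &&
    (decide (3 * i < 1 * (0 + 6 * n + 0)) &&
    (decide (3 * i < 1 * (0 + 12)) &&
     decide (3 * i > 1 * (0 + 2 * n + 0)))))))))))

-- ===== PORT B =====
-- B: O(1) closed-form existence check (file header: Source B).
def vars_on_both_sides_alt (n : Int) : Bool :=
  if n < 1 then false
  else
    let largest := min (2 * n - 1) 3
    decide (3 * largest > 2 * n)

-- ===== PRECONDITION & SPEC =====
def Spec_vars_on_both_sides (n : Int) (out : Bool) : Prop := out = vars_on_both_sides_alt n
instance (n : Int) (out : Bool) : Decidable (Spec_vars_on_both_sides n out) := by unfold Spec_vars_on_both_sides; infer_instance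

-- ===== CLAIM (what is proved, stated in full; the proofs are below) =====
def Claim_equal_vars_on_both_sides : Prop := ∀ (n : Int), Dom_vars_on_both_sides n → Spec_vars_on_both_sides n (vars_on_both_sides n)

-- ===== LEMMAS AND PROOFS =====

-- ===== VERDICT (by name: the statement is the Claim_ definition above) =====
theorem vars_on_both_sides_spec : Claim_equal_vars_on_both_sides := by
  intro n _
  unfold Spec_vars_on_both_sides vars_on_both_sides vars_on_both_sides_alt
  rw [Bool.eq_iff_iff]
  simp only [List.any_eq_true, PySem.List.mem_pyRange_one, Bool.and_eq_true,
    decide_eq_true_eq]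
  constructor
  · rintro ⟨i, ⟨h0, h1⟩, h⟩
    have hn : ¬ n < 1 := by omega
    simp only [hn, if_false, decide_eq_true_eq, gt_iff_lt, min_def]
    split_ifs <;> omega
  · intro h
    by_cases hn : n < 1
    · simp [hn] at h
    · simp only [hn, if_false, decide_eq_true_eq, gt_iff_lt, min_def] at h
      refine ⟨min (2 * n - 1) 3, ⟨?_, ?_⟩, ?_⟩ <;>
        · rw [min_def]; split_ifs at h ⊢ <;> omega
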